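-- pv_equiv track=rewrite | github.com/pypi-data/pypi-mirror-400 | packages/speedbuild/speedbuild-0.1.9.1-py3-none-any.whl/speedbuild/agent/tools/break_chunk.py | unindentCode
-- ===== SOURCE A (Python) =====
-- def unindentCode(code):
--     """
--     Split and partially unindent a block of code into separate "blocks" based on top-level lines.
--     This function processes a multiline string `code` and returns a list of text blocks. Each returned
--     block is a contiguous group of input lines (joined with newline characters) accumulated until a
--     top-level (no-leading-space) line is encountered, at which point the current accumulated block is
--     closed and a new block starts. Blank lines in the input are preserved as single newline entries
--     within blocks.
--     Behavior details:
--     - Input is split by newline characters into individual lines.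
--     - Purely blank lines (lines for which line.strip() == "") are preserved as a single newline and
--         appended to the current block (or used to separate blocks).
--     - For lines processed before any top-level (indent_count == 0) line has been seen:
--             - Lines with an indentation less than 4 spaces have their surrounding whitespace stripped
--                 (equivalent to line.strip()).
--             - Lines with an indentation of 4 or more spaces have the first four spaces removed (only one
--                 indentation level is removed).
--         This "pre-top-level" unindent behavior stops once a top-level line is seen.
--     - When a top-level line (no leading spaces) is encountered:
--             - If any lines have been accumulated since the last block boundary, that accumulated chunk is
--                 finalized and appended to the result list.
--             - A flag is set so subsequent lines are not unindented by the special rules above.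
--     - After processing all lines, any remaining accumulated lines form the final block appended to the
--         result.
--     Parameters:
--     - code (str): Multiline string containing the code to split and partially unindent.
--     Returns:
--     - List[str]: A list of string blocks. Each element is a block constructed by joining the cleaned
--         lines for that block with newline characters.
--     Notes and caveats:
--     - The function treats indentation as spaces only. Tab characters are not specially handled and may
--         produce unexpected results.
--     - The function removes at most four leading spaces from lines in the initial (pre-top-level)
--         region; it does not normalize arbitrary indentation levels beyond that.
--     - Blank lines are represented as "\n" within blocks; consecutive blank lines will be preserved as
--         separate entries in the accumulated text for that block.
--     - The implementation assumes non-empty lines that contain only spaces are handled by the early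
--         blank-line check (so they are not iterated character-by-character).
--     Example:
--     >>> code = "    def foo():\\n        pass\\n\\nclass Bar:\\n    pass"
--     >>> unindentCode(code)
--     ["def foo():\\n    pass\\n\\n", "class Bar:\\n    pass"]
--     """
--
--     blocks = []
--     cleaned = []
--     has_sub_chunk = False
--     lines = code.split("\n")
--
--     for line in lines:
--
--         if len(line.strip()) == 0:
--             cleaned.append("\n")
--             continue
--
--         indent_count = 0
--         while line[indent_count] == " ":
--             indent_count += 1
--
--         if indent_count == 0:
--             if len(cleaned) > 0:
--                 blocks.append("\n".join(cleaned))
--                 cleaned = []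
--                 has_sub_chunk = True
--
--         elif indent_count < 4:
--             if not has_sub_chunk:
--                 line = line.strip()
--         else:
--             if not has_sub_chunk:
--                 _,line = line.split("    ",1)
--
--         cleaned.append(line)
--
--     if len(cleaned) > 0:
--         blocks.append("\n".join(cleaned))
--
--     return blocks
-- ===== SOURCE B (Python) =====
-- def unindentCode(code):
--     lines = code.split("\n")
--     n = len(lines)
--     stripped = [l.strip() for l in lines]
--
--     def indent(l):
--         return len(l) - len(l.lstrip(" "))
--
--     # indices of non-blank zero-indent lines (the block boundaries)
--     tops = [i for i in range(n) if stripped[i] and indent(lines[i]) == 0]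
--
--     # K = index from which lines are kept verbatim (where A's has_sub_chunk flag
--     # turns on): the first boundary that has something accumulated before it,
--     # i.e. the first boundary except that a boundary at line 0 does not count.
--     inner = [i for i in tops if i > 0]
--     K = inner[0] if inner else n
--
--     cleaned = []
--     for i in range(n):
--         l = lines[i]
--         if not stripped[i]:
--             cleaned.append("\n")
--         elif i >= K or indent(l) == 0:
--             cleaned.append(l)
--         elif indent(l) < 4:
--             cleaned.append(stripped[i])
--         else:
--             cleaned.append(l[4:])
--
--     cuts = [0] + inner + [n]
--     return ["\n".join(cleaned[a:b]) for a, b in zip(cuts, cuts[1:])]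
-- ===== Notes on version B (the rewrite author's own statement) =====
-- stated objective: alternative
-- what changed: A's single fused loop threading blocks/cleaned/has_sub_chunk state is replaced by a two-phase index computation: boundary indices (non-blank zero-indent lines) and the unindent cutoff K are computed up front, cleaning becomes a stateless per-index map, and the blocks are obtained by slicing the cleaned list at the precomputed boundary cuts.
import Mathlib
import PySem

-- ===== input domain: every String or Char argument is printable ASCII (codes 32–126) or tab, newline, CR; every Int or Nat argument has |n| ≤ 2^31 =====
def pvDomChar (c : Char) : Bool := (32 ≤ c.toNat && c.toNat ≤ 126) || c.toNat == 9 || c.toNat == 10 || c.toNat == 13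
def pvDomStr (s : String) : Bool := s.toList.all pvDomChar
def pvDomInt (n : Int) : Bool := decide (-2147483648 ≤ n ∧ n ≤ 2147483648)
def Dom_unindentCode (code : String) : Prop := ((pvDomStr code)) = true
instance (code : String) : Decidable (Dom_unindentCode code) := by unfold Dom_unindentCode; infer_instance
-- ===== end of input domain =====

-- B replaces A's fused stateful loop (blocks/cleaned/has_sub_chunk) by two index-based
-- passes: boundary indices and an unindent threshold are computed up front, the cleaned
-- lines are produced by a position-based map, and the blocks are cut out by slicing at
-- the precomputed boundaries (objective: alternative decomposition, same cost).

-- ===== PORT A =====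
-- A's character-by-character `while line[indent_count] == " "` loop (only reached on
-- non-blank lines, where Python cannot raise)
def pvIndentA : List Char → Nat
  | [] => 0
  | c :: cs => if c = ' ' then pvIndentA cs + 1 else 0

-- A's `_, line = line.split("    ", 1)`; the `| _ => []` default is unreachable for the
-- lines A applies it to (indent ≥ 4, so the split has exactly two parts)
def pvSplit4 (l : List Char) : List Char :=
  match PySem.Chars.splitMax? l [' ', ' ', ' ', ' '] 1 with
  | some (_ :: rest :: _) => rest
  | _ => []

def unindentCodeGo : List (List Char) → List (List Char) → List (List Char) → Bool → List (List Char)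
  | [], blocks, cleaned, _ =>
      if cleaned.length > 0 then blocks ++ [PySem.Chars.join ['\n'] cleaned] else blocks
  | l :: ls, blocks, cleaned, hasSub =>
      if (PySem.Chars.strip l).length = 0 then
        unindentCodeGo ls blocks (cleaned ++ [['\n']]) hasSub
      else if pvIndentA l = 0 then
        if cleaned.length > 0 then
          unindentCodeGo ls (blocks ++ [PySem.Chars.join ['\n'] cleaned]) ([] ++ [l]) true
        else
          unindentCodeGo ls blocks (cleaned ++ [l]) hasSub
      else if pvIndentA l < 4 then
        unindentCodeGo ls blocks (cleaned ++ [if hasSub then l else PySem.Chars.strip l]) hasSub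
      else
        unindentCodeGo ls blocks (cleaned ++ [if hasSub then l else pvSplit4 l]) hasSub

def unindentCode (code : String) : List String :=
  (unindentCodeGo (PySem.Chars.splitOn code.toList ['\n']) [] [] false).map String.ofList

-- ===== PORT B =====
-- B's `len(l) - len(l.lstrip(" "))`; `l.lstrip(" ")` ported by hand as dropWhile (· = ' ')
-- (exact: lstrip with chars " " drops exactly the leading spaces)
def pvIndentB (l : List Char) : Nat := l.length - (l.dropWhile (· = ' ')).length

def unindentCode_alt (code : String) : List String :=
  let lines := PySem.Chars.splitOn code.toList ['\n']
  let n := lines.length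
  let stripped := lines.map PySem.Chars.strip
  let tops := (List.range n).filter
    (fun i => decide (stripped.getD i [] ≠ [] ∧ pvIndentB (lines.getD i []) = 0))
  let inner := tops.filter (fun i => decide (0 < i))
  let K := inner.headD n
  let cleaned := (List.range n).map (fun i =>
    let l := lines.getD i []
    if stripped.getD i [] = [] then ['\n']
    else if K ≤ i ∨ pvIndentB l = 0 then l
    else if pvIndentB l < 4 then stripped.getD i []
    else l.drop 4)  -- `l[4:]` ported by hand as drop 4 (exact: nonnegative clamped slice)
  let cuts := 0 :: inner ++ [n]
  -- `["\n".join(cleaned[a:b]) for a, b in zip(cuts, cuts[1:])]`; `cleaned[a:b]` ported by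
  -- hand as drop/take (exact: 0 ≤ a ≤ b ≤ n here)
  (cuts.zip cuts.tail).map (fun p =>
    String.ofList (PySem.Chars.join ['\n'] ((cleaned.drop p.1).take (p.2 - p.1))))

-- ===== PRECONDITION & SPEC =====
def Spec_unindentCode (code : String) (out : List String) : Prop := out = unindentCode_alt code
instance (code : String) (out : List String) : Decidable (Spec_unindentCode code out) := by unfold Spec_unindentCode; infer_instance

-- ===== CLAIM (what is proved, stated in full; the proofs are below) =====
def Claim_equal_unindentCode : Prop := ∀ (code : String), Dom_unindentCode code → Spec_unindentCode code (unindentCode code)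

-- ===== LEMMAS AND PROOFS =====

-- proof-side vocabulary
def pvBndb (l : List Char) : Bool := decide (PySem.Chars.strip l ≠ [] ∧ pvIndentA l = 0)

-- 0-based indices of the block boundaries (non-blank zero-indent lines)
def allB : List (List Char) → List Nat
  | [] => []
  | l :: ls => (if pvBndb l then [0] else []) ++ (allB ls).map (· + 1)

-- index of the first boundary (length if none)
def fB (ls : List (List Char)) : Nat := (allB ls).headD ls.length

-- line cleaning once A's has_sub_chunk flag is on
def cleanTrue (ls : List (List Char)) : List (List Char) :=
  ls.map (fun l => if PySem.Chars.strip l = [] then ['\n'] else l)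

-- line cleaning while the flag is off (it turns on at the first boundary)
def cleanFalse : List (List Char) → List (List Char)
  | [] => []
  | l :: ls =>
      if PySem.Chars.strip l = [] then ['\n'] :: cleanFalse ls
      else if pvIndentA l = 0 then l :: cleanTrue ls
      else (if pvIndentA l < 4 then PySem.Chars.strip l else l.drop 4) :: cleanFalse ls

-- cleaning of the very first line (the flag is never on there)
def pvClean0 (l : List Char) : List Char :=
  if PySem.Chars.strip l = [] then ['\n']
  else if pvIndentA l = 0 then l
  else if pvIndentA l < 4 then PySem.Chars.strip l
  else l.drop 4

def joinSegs (xs : List (List Char)) (cuts : List Nat) : List (List Char) :=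
  (cuts.zip cuts.tail).map (fun p => PySem.Chars.join ['\n'] ((xs.drop p.1).take (p.2 - p.1)))

def segCuts (a : Nat) (bs : List Nat) (m : Nat) : List Nat := 0 :: bs.map (· + a) ++ [a + m]

-- basic facts -----------------------------------------------------------------

lemma indAB (l : List Char) : pvIndentB l = pvIndentA l := by
  induction l with
  | nil => rfl
  | cons c cs ih =>
    by_cases h : c = ' '
    · simp only [pvIndentB, pvIndentA, List.dropWhile, h, if_pos, decide_true,
        List.length_cons] at ih ⊢
      have := List.length_dropWhile_le (p := fun x => decide (x = ' ')) cs
      omega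
    · simp [pvIndentB, pvIndentA, List.dropWhile, h]

lemma go_mzero (sep : List Char) (fuel : Nat) (rest : List Char) :
    PySem.Chars.splitOnMax.go sep fuel 0 rest [] [[]] = [[], rest] := by
  cases fuel <;> cases rest <;> simp [PySem.Chars.splitOnMax.go]

lemma sp4_raw (rest : List Char) :
    PySem.Chars.splitOnMax ([' ',' ',' ',' '] ++ rest) [' ',' ',' ',' '] 1 = [[], rest] := by
  unfold PySem.Chars.splitOnMax
  norm_num
  rw [PySem.Chars.splitOnMax.go]
  exact go_mzero _ _ _

lemma indentA_ge_four (l : List Char) (h : 4 ≤ pvIndentA l) :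
    ∃ rest, l = [' ', ' ', ' ', ' '] ++ rest := by
  match l with
  | [] => simp [pvIndentA] at h
  | c1 :: l1 =>
    by_cases h1 : c1 = ' '
    · subst h1
      match l1 with
      | [] => simp [pvIndentA] at h
      | c2 :: l2 =>
        by_cases h2 : c2 = ' '
        · subst h2
          match l2 with
          | [] => simp [pvIndentA] at h
          | c3 :: l3 =>
            by_cases h3 : c3 = ' '
            · subst h3
              match l3 with
              | [] => simp [pvIndentA] at h
              | c4 :: l4 =>
                by_cases h4 : c4 = ' '
                · subst h4; exact ⟨l4, rfl⟩
                · simp [pvIndentA, h4] at h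
            · simp [pvIndentA, h3] at h
        · simp [pvIndentA, h2] at h
    · simp [pvIndentA, h1] at h

lemma sp4 (l : List Char) (h : 4 ≤ pvIndentA l) : pvSplit4 l = l.drop 4 := by
  obtain ⟨rest, rfl⟩ := indentA_ge_four l h
  have h4 : ([' ', ' ', ' ', ' '] ++ rest : List Char).drop 4 = rest := rfl
  rw [h4]
  unfold pvSplit4 PySem.Chars.splitMax?
  rw [sp4_raw]
  rfl

lemma goSplit_ne_nil (sep : List Char) (fuel : Nat) :
    ∀ (l cur : List Char) (acc : List (List Char)),
      PySem.Chars.splitOn.go sep fuel l cur acc ≠ [] := by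
  induction fuel with
  | zero => intro l cur acc; simp [PySem.Chars.splitOn.go]
  | succ n ih =>
    intro l cur acc
    cases l with
    | nil => simp [PySem.Chars.splitOn.go]
    | cons c rest =>
      rw [PySem.Chars.splitOn.go]
      split <;> apply ih

lemma splitOn_ne_nil (s sep : List Char) : PySem.Chars.splitOn s sep ≠ [] := by
  unfold PySem.Chars.splitOn; apply goSplit_ne_nil

-- joinSegs toolkit ------------------------------------------------------------

-- the master invariants for A's loop ------------------------------------------

lemma joinSegs_shift (pre xs : List (List Char)) (cuts : List Nat) :
    joinSegs (pre ++ xs) (cuts.map (· + pre.length)) = joinSegs xs cuts := by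
  simp only [joinSegs, ← List.map_tail, List.zip_map, List.map_map]
  apply List.map_congr_left
  rintro ⟨p, q⟩ hpq
  simp only [Function.comp, Prod.map]
  rw [Nat.add_comm p, List.drop_length_add_append]
  have h : q + pre.length - (pre.length + p) = q - p := by omega
  rw [h]

lemma segCuts_shift (a : Nat) (bs : List Nat) (m : Nat) :
    segCuts a (bs.map (· + 1)) (m + 1) = segCuts (a + 1) bs m := by
  unfold segCuts
  rw [List.map_map]
  congr 1
  congr 1
  · exact List.map_congr_left fun x _ => by simp; omega
  · congr 1; omega

lemma map_getD_range {β : Type} (ls : List (List Char)) (f : List Char → β) :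
    (List.range ls.length).map (fun i => f (ls.getD i [])) = ls.map f := by
  induction ls with
  | nil => rfl
  | cons l ls ih =>
    simp only [List.length_cons, List.range_succ_eq_map, List.map_cons, List.map_map]
    refine congrArg₂ _ rfl ?_
    simpa using ih

lemma getD_map_strip (ls : List (List Char)) (i : Nat) :
    (ls.map PySem.Chars.strip).getD i [] = PySem.Chars.strip (ls.getD i []) := by
  induction ls generalizing i with
  | nil => cases i <;> rfl
  | cons l ls ih => cases i with
    | zero => rfl
    | succ n => exact ih n

lemma allB_positional (ls : List (List Char)) :
    (List.range ls.length).filter (fun i => pvBndb (ls.getD i [])) = allB ls := by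
  induction ls with
  | nil => rfl
  | cons l ls ih =>
    rw [List.length_cons, List.range_succ_eq_map]
    rw [List.filter_cons, List.filter_map]
    have hp : ((fun i => pvBndb ((l :: ls).getD i [])) ∘ (· + 1)) = (fun i => pvBndb (ls.getD i [])) := by
      funext i; rfl
    rw [hp, ih, allB]
    cases h : pvBndb l <;> simp [h]

lemma headD_map_succ (bs : List Nat) (m : Nat) : (bs.map (· + 1)).headD (m + 1) = bs.headD m + 1 := by
  cases bs <;> simp

lemma fB_cons (l : List Char) (ls : List (List Char)) :
    fB (l :: ls) = if pvBndb l then 0 else fB ls + 1 := by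
  unfold fB
  cases h : pvBndb l
  · rw [allB]; simp [h, List.length_cons]
  · rw [allB]; simp [h]

lemma inner_eq (l : List Char) (ls : List (List Char)) :
    (allB (l :: ls)).filter (fun i => decide (0 < i)) = (allB ls).map (· + 1) := by
  rw [allB, List.filter_append, List.filter_map]
  have : ((fun i => decide (0 < i)) ∘ (· + 1)) = fun _ => true := by
    funext i; simp
  rw [this, List.filter_true]
  cases h : pvBndb l <;> simp

lemma cleanFalse_positional (ls : List (List Char)) :
    (List.range ls.length).map (fun i =>
        if PySem.Chars.strip (ls.getD i []) = [] then ['\n']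
        else if fB ls ≤ i ∨ pvIndentA (ls.getD i []) = 0 then ls.getD i []
        else if pvIndentA (ls.getD i []) < 4 then PySem.Chars.strip (ls.getD i [])
        else (ls.getD i []).drop 4) = cleanFalse ls := by
  induction ls with
  | nil => rfl
  | cons l ls ih =>
    rw [List.length_cons, List.range_succ_eq_map, List.map_cons, List.map_map]
    rw [cleanFalse]
    have hfb := fB_cons l ls
    by_cases hb : PySem.Chars.strip l = []
    · -- blank head: not a boundary
      have hbnd : pvBndb l = false := by simp [pvBndb, hb]
      rw [hbnd, if_neg (by simp)] at hfb
      rw [if_pos hb]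
      refine congrArg₂ _ (by simp [hb]) ?_
      rw [← ih]
      apply List.map_congr_left
      intro i _
      simp only [Function.comp, List.getD_cons_succ, hfb]
      simp only [Nat.succ_eq_add_one, Nat.add_le_add_iff_right]
    · by_cases h0 : pvIndentA l = 0
      · -- boundary head
        have hbnd : pvBndb l = true := by simp [pvBndb, hb, h0]
        rw [hbnd, if_pos rfl] at hfb
        rw [if_neg hb, if_pos h0]
        refine congrArg₂ _ (by simp [hb, h0]) ?_
        rw [cleanTrue, ← map_getD_range]
        apply List.map_congr_left
        intro i _
        simp only [Function.comp, List.getD_cons_succ, hfb]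
        by_cases hbi : PySem.Chars.strip (ls.getD i []) = [] <;> simp
      · -- indented head
        have hbnd : pvBndb l = false := by simp [pvBndb, h0]
        rw [hbnd, if_neg (by simp)] at hfb
        rw [if_neg hb, if_neg h0]
        refine congrArg₂ _ ?_ ?_
        · simp [hb, h0, hfb]
        · rw [← ih]
          apply List.map_congr_left
          intro i _
          simp only [Function.comp, List.getD_cons_succ, hfb]
          simp only [Nat.succ_eq_add_one, Nat.add_le_add_iff_right]

lemma joinSegs_cons (xs : List (List Char)) (c1 c2 : Nat) (rest : List Nat) :
    joinSegs xs (c1 :: c2 :: rest) =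
      PySem.Chars.join ['\n'] ((xs.drop c1).take (c2 - c1)) :: joinSegs xs (c2 :: rest) := by
  simp [joinSegs]

lemma joinSegs_flush (acc xs : List (List Char)) (bs : List Nat) (m : Nat) :
    joinSegs (acc ++ xs) (segCuts acc.length (0 :: bs.map (· + 1)) (m + 1)) =
      PySem.Chars.join ['\n'] acc :: joinSegs xs (segCuts 1 bs m) := by
  have h1 : segCuts acc.length (0 :: bs.map (· + 1)) (m + 1) =
      0 :: ((0 + acc.length) :: ((bs.map (· + 1)).map (· + acc.length) ++ [(1 + m) + acc.length])) := by
    unfold segCuts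
    simp [List.map_map]
    omega
  rw [h1, joinSegs_cons]
  have h2 : ((0 + acc.length) :: ((bs.map (· + 1)).map (· + acc.length) ++ [(1 + m) + acc.length]))
      = (segCuts 1 bs m).map (· + acc.length) := by
    simp [segCuts]
  rw [h2, joinSegs_shift]
  congr 1
  simp

lemma mt_true (ls : List (List Char)) :
    ∀ (blocks acc : List (List Char)), acc ≠ [] →
      unindentCodeGo ls blocks acc true =
        blocks ++ joinSegs (acc ++ cleanTrue ls) (segCuts acc.length (allB ls) ls.length) := by
  induction ls with
  | nil =>
    intro blocks acc hacc
    rw [unindentCodeGo, if_pos (by simpa [List.length_pos_iff] using hacc)]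
    simp [cleanTrue, allB, joinSegs, segCuts]
  | cons l ls ih =>
    intro blocks acc hacc
    rw [unindentCodeGo]
    by_cases hb : (PySem.Chars.strip l).length = 0
    · rw [if_pos hb, ih _ _ (by simp)]
      have hb' : PySem.Chars.strip l = [] := List.length_eq_zero_iff.mp hb
      have hbnd : pvBndb l = false := by simp [pvBndb, hb']
      rw [allB, hbnd]
      simp only [Bool.false_eq_true, if_false, List.nil_append, List.length_append,
        List.length_cons, List.length_nil]
      rw [segCuts_shift]
      simp [cleanTrue, hb', List.append_assoc]
    · have hb' : PySem.Chars.strip l ≠ [] := fun h => hb (by simp [h])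
      rw [if_neg hb]
      by_cases h0 : pvIndentA l = 0
      · rw [if_pos h0, if_pos (by simpa [List.length_pos_iff] using hacc)]
        rw [List.nil_append, ih _ [l] (by simp)]
        have hbnd : pvBndb l = true := by simp [pvBndb, hb', h0]
        have hct : cleanTrue (l :: ls) = l :: cleanTrue ls := by simp [cleanTrue, hb']
        rw [allB, hbnd, hct]
        simp only [if_true, List.singleton_append, List.length_cons,
          List.length_nil, Nat.zero_add]
        rw [joinSegs_flush]
        simp [List.append_assoc]
      · have hbnd : pvBndb l = false := by simp [pvBndb, h0]
        have step : ∀ x : List Char,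
            unindentCodeGo ls blocks (acc ++ [x]) true =
              blocks ++ joinSegs ((acc ++ [x]) ++ cleanTrue ls)
                (segCuts (acc.length + 1) (allB ls) ls.length) := by
          intro x
          rw [ih _ _ (by simp)]
          simp
        rw [if_neg h0]
        by_cases h4 : pvIndentA l < 4
        · rw [if_pos h4, if_pos rfl, step]
          rw [allB, hbnd]
          simp only [Bool.false_eq_true, if_false, List.nil_append, List.length_cons]
          rw [segCuts_shift]
          simp [cleanTrue, hb', List.append_assoc]
        · rw [if_neg h4, if_pos rfl, step]
          rw [allB, hbnd]
          simp only [Bool.false_eq_true, if_false, List.nil_append, List.length_cons]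
          rw [segCuts_shift]
          simp [cleanTrue, hb', List.append_assoc]

lemma mt_false (ls : List (List Char)) :
    ∀ (blocks acc : List (List Char)), acc ≠ [] →
      unindentCodeGo ls blocks acc false =
        blocks ++ joinSegs (acc ++ cleanFalse ls) (segCuts acc.length (allB ls) ls.length) := by
  induction ls with
  | nil =>
    intro blocks acc hacc
    rw [unindentCodeGo, if_pos (by simpa [List.length_pos_iff] using hacc)]
    simp [cleanFalse, allB, joinSegs, segCuts]
  | cons l ls ih =>
    intro blocks acc hacc
    rw [unindentCodeGo]
    by_cases hb : (PySem.Chars.strip l).length = 0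
    · rw [if_pos hb, ih _ _ (by simp)]
      have hb' : PySem.Chars.strip l = [] := List.length_eq_zero_iff.mp hb
      have hbnd : pvBndb l = false := by simp [pvBndb, hb']
      rw [allB, hbnd]
      simp only [Bool.false_eq_true, if_false, List.nil_append, List.length_append,
        List.length_cons, List.length_nil]
      rw [segCuts_shift]
      rw [cleanFalse, if_pos hb']
      simp [List.append_assoc]
    · have hb' : PySem.Chars.strip l ≠ [] := fun h => hb (by simp [h])
      rw [if_neg hb]
      by_cases h0 : pvIndentA l = 0
      · rw [if_pos h0, if_pos (by simpa [List.length_pos_iff] using hacc)]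
        rw [List.nil_append, mt_true ls _ [l] (by simp)]
        have hbnd : pvBndb l = true := by simp [pvBndb, hb', h0]
        have hcf : cleanFalse (l :: ls) = l :: cleanTrue ls := by
          rw [cleanFalse, if_neg hb', if_pos h0]
        rw [allB, hbnd, hcf]
        simp only [if_true, List.singleton_append, List.length_cons,
          List.length_nil, Nat.zero_add]
        rw [joinSegs_flush]
        simp [List.append_assoc]
      · have hbnd : pvBndb l = false := by simp [pvBndb, h0]
        have step : ∀ x : List Char,
            unindentCodeGo ls blocks (acc ++ [x]) false =
              blocks ++ joinSegs ((acc ++ [x]) ++ cleanFalse ls)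
                (segCuts (acc.length + 1) (allB ls) ls.length) := by
          intro x
          rw [ih _ _ (by simp)]
          simp
        rw [if_neg h0]
        by_cases h4 : pvIndentA l < 4
        · rw [if_pos h4]
          have hred : (if (false : Bool) then l else PySem.Chars.strip l) = PySem.Chars.strip l := rfl
          rw [hred, step]
          rw [allB, hbnd]
          simp only [Bool.false_eq_true, if_false, List.nil_append, List.length_cons]
          rw [segCuts_shift]
          rw [cleanFalse, if_neg hb', if_neg h0, if_pos h4]
          simp [List.append_assoc]
        · rw [if_neg h4]
          have hred : (if (false : Bool) then l else pvSplit4 l) = pvSplit4 l := rfl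
          rw [hred, step]
          rw [allB, hbnd]
          simp only [Bool.false_eq_true, if_false, List.nil_append, List.length_cons]
          rw [segCuts_shift]
          rw [cleanFalse, if_neg hb', if_neg h0, if_neg h4]
          rw [sp4 l (by omega)]
          simp [List.append_assoc]

lemma goA_top (l : List Char) (ls : List (List Char)) :
    unindentCodeGo (l :: ls) [] [] false =
      joinSegs (pvClean0 l :: cleanFalse ls) (segCuts 1 (allB ls) ls.length) := by
  rw [unindentCodeGo]
  by_cases hb : (PySem.Chars.strip l).length = 0
  · have hb' : PySem.Chars.strip l = [] := List.length_eq_zero_iff.mp hb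
    rw [if_pos hb, mt_false ls _ _ (by simp), pvClean0, if_pos hb']
    simp
  · have hb' : PySem.Chars.strip l ≠ [] := fun h => hb (by simp [h])
    rw [if_neg hb]
    by_cases h0 : pvIndentA l = 0
    · rw [if_pos h0, if_neg (by simp), mt_false ls _ _ (by simp)]
      rw [pvClean0, if_neg hb', if_pos h0]
      simp
    · rw [if_neg h0]
      by_cases h4 : pvIndentA l < 4
      · rw [if_pos h4]
        have hred : (if (false : Bool) then l else PySem.Chars.strip l) = PySem.Chars.strip l := rfl
        rw [hred, mt_false ls _ _ (by simp)]
        rw [pvClean0, if_neg hb', if_neg h0, if_pos h4]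
        simp
      · rw [if_neg h4]
        have hred : (if (false : Bool) then l else pvSplit4 l) = pvSplit4 l := rfl
        rw [hred, mt_false ls _ _ (by simp), sp4 l (by omega)]
        rw [pvClean0, if_neg hb', if_neg h0, if_neg h4]
        simp

-- B's positional computations -------------------------------------------------

lemma alt_positional (code : String) (l : List Char) (ls : List (List Char))
    (hls : PySem.Chars.splitOn code.toList ['\n'] = l :: ls) :
    unindentCode_alt code =
      (joinSegs (pvClean0 l :: cleanFalse ls) (segCuts 1 (allB ls) ls.length)).map String.ofList := by
  simp only [unindentCode_alt, hls]
  have htops : ((List.range (l :: ls).length).filter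
      (fun i => decide (((l :: ls).map PySem.Chars.strip).getD i [] ≠ [] ∧
        pvIndentB ((l :: ls).getD i []) = 0))) = allB (l :: ls) := by
    rw [← allB_positional]
    apply List.filter_congr
    intro i _
    simp only [getD_map_strip, indAB, pvBndb]
  rw [htops, inner_eq l ls, List.length_cons, headD_map_succ]
  have hclean : (List.range (ls.length + 1)).map (fun i =>
      if ((l :: ls).map PySem.Chars.strip).getD i [] = [] then ['\n']
      else if (allB ls).headD ls.length + 1 ≤ i ∨ pvIndentB ((l :: ls).getD i []) = 0 then
        (l :: ls).getD i []
      else if pvIndentB ((l :: ls).getD i []) < 4 then ((l :: ls).map PySem.Chars.strip).getD i []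
      else ((l :: ls).getD i []).drop 4) = pvClean0 l :: cleanFalse ls := by
    rw [List.range_succ_eq_map, List.map_cons, List.map_map]
    refine congrArg₂ _ ?_ ?_
    · simp [indAB, pvClean0]
    · rw [← cleanFalse_positional ls]
      apply List.map_congr_left
      intro i _
      simp only [Function.comp, List.getD_cons_succ, getD_map_strip, indAB, fB,
        Nat.succ_eq_add_one, Nat.add_le_add_iff_right]
      rfl
  rw [hclean]
  have hcuts : (0 :: (allB ls).map (· + 1) ++ [ls.length + 1]) = segCuts 1 (allB ls) ls.length := by
    simp [segCuts]
    omega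
  rw [hcuts]
  simp [joinSegs, List.map_map]

-- ===== VERDICT (by name: the statement is the Claim_ definition above) =====
theorem unindentCode_spec : Claim_equal_unindentCode := by
  intro code _
  unfold Spec_unindentCode unindentCode
  obtain ⟨l, ls, hls⟩ : ∃ l ls, PySem.Chars.splitOn code.toList ['\n'] = l :: ls := by
    rcases h : PySem.Chars.splitOn code.toList ['\n'] with _ | ⟨a, b⟩
    · exact absurd h (splitOn_ne_nil _ _)
    · exact ⟨a, b, rfl⟩
  rw [hls, goA_top, alt_positional code l ls hls]
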